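-- pv_equiv track=rewrite | github.com/aramasahay07/Stats-engine | knowledge/knowledge/enrichment.py | extract_output_keys
-- ===== SOURCE A (Python) =====
-- from typing import Any, Dict, List
--
-- DEFAULT_KEY_WHITELIST = {
--     "p_value", "t_stat", "z_stat", "f_stat", "chi2", "df",
--     "r_squared", "adjusted_r_squared",
--     "slope", "intercept", "coefficients",
--     "pearson_r", "spearman_r", "kendall_tau",
--     "mae", "mse", "rmse", "accuracy", "precision", "recall", "f1", "auc", "roc_auc",
--     "mape",
-- }
--
-- def extract_output_keys(result: Dict[str, Any]) -> List[str]: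
--     keys: set[str] = set()
--     for k, v in (result or {}).items():
--         if k in DEFAULT_KEY_WHITELIST:
--             keys.add(k)
--         if isinstance(v, dict):
--             for kk in v.keys():
--                 if kk in DEFAULT_KEY_WHITELIST:
--                     keys.add(kk)
--     return sorted(keys)
-- ===== SOURCE B (Python) =====
-- from typing import Any, Dict, List
--
-- DEFAULT_KEY_WHITELIST = {
--     "p_value", "t_stat", "z_stat", "f_stat", "chi2", "df",
--     "r_squared", "adjusted_r_squared",
--     "slope", "intercept", "coefficients",
--     "pearson_r", "spearman_r", "kendall_tau",
--     "mae", "mse", "rmse", "accuracy", "precision", "recall", "f1", "auc", "roc_auc",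
--     "mape",
-- }
--
-- _SORTED_WHITELIST = sorted(DEFAULT_KEY_WHITELIST)
--
-- def extract_output_keys(result: Dict[str, Any]) -> List[str]:
--     # Inverted traversal: iterate over the (pre-sorted) whitelist and keep each
--     # whitelisted key that occurs in the data; the output is built directly in
--     # sorted order, so no key set is accumulated and nothing is sorted at the end.
--     r = result or {}
--     return [w for w in _SORTED_WHITELIST
--             if w in r or any(isinstance(v, dict) and w in v for v in r.values())]
-- ===== Notes on version B (the rewrite author's own statement) =====
-- stated objective: alternative
-- what changed: B inverts the traversal: instead of scanning the dict and nested dicts while filtering each key against the whitelist and sorting the collected set at the end, it iterates over the pre-sorted constant whitelist and keeps each entry that occurs among the top-level or nested keys, producing the output directly in sorted order with no accumulator set and no final sort.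
import Mathlib
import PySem

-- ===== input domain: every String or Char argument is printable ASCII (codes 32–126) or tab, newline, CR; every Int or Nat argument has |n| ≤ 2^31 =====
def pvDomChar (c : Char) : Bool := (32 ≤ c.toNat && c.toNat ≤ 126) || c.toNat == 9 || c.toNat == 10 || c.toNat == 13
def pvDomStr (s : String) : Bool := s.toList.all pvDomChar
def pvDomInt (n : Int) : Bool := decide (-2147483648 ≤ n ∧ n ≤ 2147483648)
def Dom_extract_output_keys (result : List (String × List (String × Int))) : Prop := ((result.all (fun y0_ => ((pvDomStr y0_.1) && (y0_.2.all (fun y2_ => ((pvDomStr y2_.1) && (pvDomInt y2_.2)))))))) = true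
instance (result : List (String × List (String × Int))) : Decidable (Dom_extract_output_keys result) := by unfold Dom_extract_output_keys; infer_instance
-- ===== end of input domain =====

-- B inverts the traversal: it walks the pre-sorted constant whitelist and keeps each entry
-- present among the data's top-level or nested keys, emitting the output already sorted
-- (objective: alternative — no accumulator set, no final sort).

-- DEFAULT_KEY_WHITELIST (module constant)
def pvWL : List String :=
  ["p_value", "t_stat", "z_stat", "f_stat", "chi2", "df",
   "r_squared", "adjusted_r_squared",
   "slope", "intercept", "coefficients",
   "pearson_r", "spearman_r", "kendall_tau",
   "mae", "mse", "rmse", "accuracy", "precision", "recall", "f1", "auc", "roc_auc",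
   "mape"]

-- _SORTED_WHITELIST (module constant of Source B: sorted(DEFAULT_KEY_WHITELIST))
def pvWLsorted : List String := PySem.List.sorted (PySem.Set.ofList pvWL) (fun x => x) false

-- ===== PORT A =====
-- filter-during-traversal: add each (top-level or nested) key iff it is whitelisted, sort
def extract_output_keys (result : List (String × List (String × Int))) : List String :=
  let keys : PySem.Set String :=
    result.foldl (fun keys kv =>
      let keys := if PySem.Set.contains pvWL kv.1 then PySem.Set.add keys kv.1 else keys
      -- isinstance(v, dict) is always true at this type
      kv.2.foldl (fun ks p => if PySem.Set.contains pvWL p.1 then PySem.Set.add ks p.1 else ks) keys)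
      PySem.Set.empty
  PySem.List.sorted keys (fun x => x) false

-- ===== PORT B =====
-- inverted traversal: keep each pre-sorted whitelist entry that occurs in the data
def extract_output_keys_alt (result : List (String × List (String × Int))) : List String :=
  pvWLsorted.filter (fun w =>
    result.any (fun kv => w == kv.1) ||
    result.any (fun kv => kv.2.any (fun p => w == p.1)))

-- ===== PRECONDITION & SPEC =====
def Spec_extract_output_keys (result : List (String × List (String × Int))) (out : List String) : Prop := out = extract_output_keys_alt result
instance (result : List (String × List (String × Int))) (out : List String) : Decidable (Spec_extract_output_keys result out) := by unfold Spec_extract_output_keys; infer_instance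

-- ===== CLAIM (what is proved, stated in full; the proofs are below) =====
def Claim_equal_extract_output_keys : Prop := ∀ (result : List (String × List (String × Int))), Dom_extract_output_keys result → Spec_extract_output_keys result (extract_output_keys result)

-- ===== LEMMAS AND PROOFS =====

-- A's inner loop over one nested dict
theorem memA_inner (ps : List (String × Int)) (acc : PySem.Set String) (x : String) :
    (x ∈ ps.foldl (fun ks p => if PySem.Set.contains pvWL p.1 then PySem.Set.add ks p.1 else ks) acc)
      ↔ x ∈ acc ∨ (x ∈ pvWL ∧ x ∈ ps.map Prod.fst) := by
  induction ps generalizing acc with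
  | nil => simp
  | cons p t ih =>
    simp only [List.foldl_cons, ih, List.map_cons, List.mem_cons]
    split_ifs with h
    · rw [PySem.Set.mem_add]
      have := (PySem.Set.contains_iff pvWL p.1).mp h
      constructor
      · rintro ((h1 | rfl) | h2)
        · exact Or.inl h1
        · exact Or.inr ⟨this, Or.inl rfl⟩
        · exact Or.inr ⟨h2.1, Or.inr h2.2⟩
      · rintro (h1 | ⟨hw, (rfl | hm)⟩)
        · exact Or.inl (Or.inl h1)
        · exact Or.inl (Or.inr rfl)
        · exact Or.inr ⟨hw, hm⟩
    · have hnot : ¬ x ∈ pvWL ∨ ¬ x = p.1 := by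
        by_cases hx : x = p.1
        · subst hx
          exact Or.inl (fun hm => h ((PySem.Set.contains_iff pvWL p.1).mpr hm))
        · exact Or.inr hx
      constructor
      · rintro (h1 | h2)
        · exact Or.inl h1
        · exact Or.inr ⟨h2.1, Or.inr h2.2⟩
      · rintro (h1 | ⟨hw, (rfl | hm)⟩)
        · exact Or.inl h1
        · rcases hnot with hn | hn
          · exact absurd hw hn
          · exact absurd rfl hn
        · exact Or.inr ⟨hw, hm⟩

theorem nodupA_inner (ps : List (String × Int)) (acc : PySem.Set String) (h : acc.Nodup) :
    (ps.foldl (fun ks p => if PySem.Set.contains pvWL p.1 then PySem.Set.add ks p.1 else ks) acc).Nodup := by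
  induction ps generalizing acc with
  | nil => exact h
  | cons p t ih =>
    simp only [List.foldl_cons]
    apply ih
    split_ifs
    · exact PySem.Set.nodup_add _ _ h
    · exact h

theorem memA (result : List (String × List (String × Int))) (acc : PySem.Set String) (x : String) :
    (x ∈ result.foldl (fun keys kv =>
        kv.2.foldl (fun ks p => if PySem.Set.contains pvWL p.1 then PySem.Set.add ks p.1 else ks)
          (if PySem.Set.contains pvWL kv.1 then PySem.Set.add keys kv.1 else keys)) acc)
      ↔ x ∈ acc ∨ (x ∈ pvWL ∧ ∃ kv ∈ result, x = kv.1 ∨ x ∈ kv.2.map Prod.fst) := by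
  induction result generalizing acc with
  | nil => simp
  | cons kv t ih =>
    simp only [List.foldl_cons, ih, memA_inner, List.mem_cons]
    constructor
    · rintro ((h1 | ⟨hw, hm⟩) | h2)
      · split_ifs at h1 with h
        · rw [PySem.Set.mem_add _ _ _] at h1
          rcases h1 with h1 | rfl
          · exact Or.inl h1
          · exact Or.inr ⟨(PySem.Set.contains_iff pvWL kv.1).mp h, ⟨kv, Or.inl rfl, Or.inl rfl⟩⟩
        · exact Or.inl h1
      · exact Or.inr ⟨hw, ⟨kv, Or.inl rfl, Or.inr hm⟩⟩
      · obtain ⟨hw, kv', hkv', hx⟩ := h2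
        exact Or.inr ⟨hw, ⟨kv', Or.inr hkv', hx⟩⟩
    · rintro (h1 | ⟨hw, kv', (rfl | hkv'), hx⟩)
      · left; left
        split_ifs
        · exact (PySem.Set.mem_add _ _ _).mpr (Or.inl h1)
        · exact h1
      · rcases hx with rfl | hx
        · left; left
          rw [(PySem.Set.contains_iff pvWL _).mpr hw]
          simp only [if_true]
          exact (PySem.Set.mem_add _ _ _).mpr (Or.inr rfl)
        · exact Or.inl (Or.inr ⟨hw, hx⟩)
      · exact Or.inr ⟨hw, kv', hkv', hx⟩

theorem nodupA (result : List (String × List (String × Int))) (acc : PySem.Set String) (h : acc.Nodup) :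
    (result.foldl (fun keys kv =>
        kv.2.foldl (fun ks p => if PySem.Set.contains pvWL p.1 then PySem.Set.add ks p.1 else ks)
          (if PySem.Set.contains pvWL kv.1 then PySem.Set.add keys kv.1 else keys)) acc).Nodup := by
  induction result generalizing acc with
  | nil => exact h
  | cons kv t ih =>
    simp only [List.foldl_cons]
    apply ih
    apply nodupA_inner
    split_ifs
    · exact PySem.Set.nodup_add _ _ h
    · exact h

-- the sorted whitelist is strictly increasing and lists the same strings as pvWL
theorem pvWLsorted_lt : pvWLsorted.Pairwise (· < ·) :=
  PySem.List.sorted_ofList_pairwise_lt pvWL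

theorem mem_pvWLsorted (x : String) : x ∈ pvWLsorted ↔ x ∈ pvWL := by
  rw [pvWLsorted, PySem.List.mem_sorted, PySem.Set.mem_ofList]

-- ===== VERDICT (by name: the statement is the Claim_ definition above) =====
theorem extract_output_keys_spec : Claim_equal_extract_output_keys := by
  intro result _
  show extract_output_keys result = extract_output_keys_alt result
  unfold extract_output_keys extract_output_keys_alt
  simp only []
  apply PySem.List.sorted_eq_of_perm_of_pairwise_lt
  · apply (List.perm_ext_iff_of_nodup _ _).mpr
    · intro x
      rw [List.mem_filter, memA]
      simp only [List.any_eq_true, Bool.or_eq_true, beq_iff_eq, PySem.Set.empty,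
        List.not_mem_nil, false_or, List.mem_map, mem_pvWLsorted]
      constructor
      · rintro ⟨hw, (⟨kv, hkv, rfl⟩ | ⟨kv, hkv, p, hp, rfl⟩)⟩
        · exact ⟨hw, kv, hkv, Or.inl rfl⟩
        · exact ⟨hw, kv, hkv, Or.inr ⟨p, hp, rfl⟩⟩
      · rintro ⟨hw, kv, hkv, (rfl | ⟨p, hp, rfl⟩)⟩
        · exact ⟨hw, Or.inl ⟨kv, hkv, rfl⟩⟩
        · exact ⟨hw, Or.inr ⟨kv, hkv, p, hp, rfl⟩⟩
    · exact (pvWLsorted_lt.nodup).filter _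
    · exact nodupA _ _ (by simp [PySem.Set.empty])
  · exact pvWLsorted_lt.filter _
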